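-- pv_equiv track=rewrite | github.com/emc255/python-algorithm-design | questions/hard/string/number_of_atoms.py | count_of_atoms_v2
-- ===== SOURCE A (Python) =====
-- import collections
--
-- def count_of_atoms_v2(formula: str) -> str:
--     def parse_formula(formula):
--         stack = [collections.defaultdict(int)]
--         i, n = 0, len(formula)
--
--         while i < n:
--             if formula[i] == '(':
--                 stack.append(collections.defaultdict(int))
--                 i += 1
--             elif formula[i] == ')':
--                 i += 1
--                 start = i
--                 while i < n and formula[i].isdigit():
--                     i += 1
--                 multiplier = int(formula[start:i] or 1)
--                 top = stack.pop()
--                 for elem, cnt in top.items():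
--                     stack[-1][elem] += cnt * multiplier
--             else:
--                 start = i
--                 i += 1
--                 while i < n and formula[i].islower():
--                     i += 1
--                 elem = formula[start:i]
--                 start = i
--                 while i < n and formula[i].isdigit():
--                     i += 1
--                 count = int(formula[start:i] or 1)
--                 stack[-1][elem] += count
--
--         return stack[0]
--
--     element_counts = parse_formula(formula)
--     sorted_elements = sorted(element_counts.items())
--     result = []
--
--     for elem, count in sorted_elements:
--         result.append(elem)
--         if count > 1:
--             result.append(str(count))
--
--     return ''.join(result)
-- ===== SOURCE B (Python) =====
-- def count_of_atoms_v2(formula: str) -> str: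
--     n = len(formula)
--
--     def parse(i):
--         # returns (counts, index): stops at ')' or end of string
--         counts = {}
--         while i < n and formula[i] != ')':
--             if formula[i] == '(':
--                 inner, i = parse(i + 1)
--                 i += 1  # skip the closing ')'
--                 j = i
--                 while j < n and formula[j].isdigit():
--                     j += 1
--                 mult = int(formula[i:j]) if j > i else 1
--                 i = j
--                 for elem, cnt in inner.items():
--                     counts[elem] = counts.get(elem, 0) + cnt * mult
--             else:
--                 j = i + 1
--                 while j < n and formula[j].islower():
--                     j += 1
--                 elem = formula[i:j]
--                 k = j
--                 while k < n and formula[k].isdigit():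
--                     k += 1
--                 cnt = int(formula[j:k]) if k > j else 1
--                 i = k
--                 counts[elem] = counts.get(elem, 0) + cnt
--         return counts, i
--
--     counts, _ = parse(0)
--     return ''.join(e + (str(c) if c > 1 else '')
--                    for e, c in sorted(counts.items()))
-- ===== Notes on version B (the rewrite author's own statement) =====
-- stated objective: alternative
-- what changed: Replaced A's explicit stack-of-dicts while-loop parser by a recursive-descent parser parse(i) that returns (counts, index), stopping at ')' or end of string and folding each multiplied inner group into the caller's dict; the output stage becomes a single join over a generator instead of an appended list.
-- outside the precondition, e.g. on count_of_atoms_v2('(H2'): A returns '', B returns 'H2'; on count_of_atoms_v2('H)'): A raises IndexError, B returns 'H'; on count_of_atoms_v2(')'): A raises IndexError, B returns ''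
import Mathlib
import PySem

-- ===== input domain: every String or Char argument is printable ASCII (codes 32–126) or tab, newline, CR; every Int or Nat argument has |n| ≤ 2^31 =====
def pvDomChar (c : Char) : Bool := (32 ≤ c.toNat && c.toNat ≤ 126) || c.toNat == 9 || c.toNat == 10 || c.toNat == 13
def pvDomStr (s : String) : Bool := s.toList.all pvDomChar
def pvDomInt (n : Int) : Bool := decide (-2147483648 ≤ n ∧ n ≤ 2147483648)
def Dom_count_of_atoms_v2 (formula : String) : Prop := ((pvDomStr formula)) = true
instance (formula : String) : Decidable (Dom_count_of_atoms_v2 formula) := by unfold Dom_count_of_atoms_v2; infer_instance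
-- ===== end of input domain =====

-- B replaces A's explicit stack-of-dicts while-loop by a recursive-descent parser returning
-- (counts, index); objective: alternative decomposition (same cost).

-- ===== PORT A =====
-- shared scanning helpers (both Pythons contain the identical inner while-loops)
-- "while i < n and formula[i].isdigit(): i += 1"
def scanDig (cs : List Char) (i : Nat) : Nat :=
  if h : i < cs.length ∧ PySem.Chars.isdigit (cs.getD i ' ') = true then scanDig cs (i + 1) else i
termination_by cs.length - i
decreasing_by omega

-- "while i < n and formula[i].islower(): i += 1"
def scanLow (cs : List Char) (i : Nat) : Nat :=
  if h : i < cs.length ∧ PySem.Chars.islower (cs.getD i ' ') = true then scanLow cs (i + 1) else i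
termination_by cs.length - i
decreasing_by omega

-- int(formula[a:b] or 1) / (int(formula[a:b]) if b > a else 1): the slice is all digits, so
-- Int.ofChars? is some there (the getD 0 branch is unreachable on any scanned slice)
def numVal (cs : List Char) (a b : Nat) : Int :=
  if a = b then 1 else (PySem.Int.ofChars? ((cs.drop a).take (b - a))).getD 0

-- "stack[-1][elem] += cnt" (defaultdict(int) getitem += / counts.get(elem, 0) +)
def addElem (d : PySem.Dict String Int) (elem : String) (cnt : Int) : PySem.Dict String Int :=
  d.insert elem (d.getD elem 0 + cnt)

-- "for elem, cnt in top.items(): stack[-1][elem] += cnt * multiplier"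
def mergeMul (acc top : PySem.Dict String Int) (m : Int) : PySem.Dict String Int :=
  top.items.foldl (fun acc p => acc.insert p.1 (acc.getD p.1 0 + p.2 * m)) acc

-- A's while loop; the stack is held TOP-FIRST (Python appends/pops at the right end).
-- fuel = cs.length + 1 always suffices: every iteration advances i by at least 1.
-- The '_ => []' branches are where Python's stack underflows (IndexError, outside Pre_).
def loopA (cs : List Char) : Nat → Nat → List (PySem.Dict String Int) → List (PySem.Dict String Int)
  | 0, _, stack => stack
  | fuel + 1, i, stack =>
    if i < cs.length then
      if cs.getD i ' ' = '(' then
        loopA cs fuel (i + 1) (PySem.Dict.empty :: stack)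
      else if cs.getD i ' ' = ')' then
        let i2 := scanDig cs (i + 1)
        let m := numVal cs (i + 1) i2
        match stack with
        | top :: outer :: rest => loopA cs fuel i2 (mergeMul outer top m :: rest)
        | _ => []
      else
        let i1 := scanLow cs (i + 1)
        let elem := String.ofList ((cs.drop i).take (i1 - i))
        let i2 := scanDig cs i1
        let cnt := numVal cs i1 i2
        match stack with
        | top :: rest => loopA cs fuel i2 (addElem top elem cnt :: rest)
        | [] => []
    else stack

def count_of_atoms_v2 (formula : String) : String :=
  let cs := formula.toList
  let stack := loopA cs (cs.length + 1) 0 [PySem.Dict.empty]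
  let d := stack.getLastD PySem.Dict.empty   -- "return stack[0]" (bottom of the stack)
  let sortedE := PySem.List.sorted2 d.items (fun p => p.1) (fun p => p.2) false
  let result := sortedE.foldl
    (fun (r : List String) p =>
      let r1 := r ++ [p.1]
      if p.2 > 1 then r1 ++ [PySem.Int.toStr p.2] else r1) []
  PySem.Str.join "" result

-- ===== PORT B =====
-- recursive-descent "parse(i)": stops at ')' or end of string, returns (counts, index).
-- fuel = cs.length + 1 suffices: every recursive call advances i by at least 1.
def parseB (cs : List Char) : Nat → Nat → PySem.Dict String Int → PySem.Dict String Int × Nat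
  | 0, i, counts => (counts, i)
  | fuel + 1, i, counts =>
    if i < cs.length ∧ cs.getD i ' ' ≠ ')' then
      if cs.getD i ' ' = '(' then
        let r := parseB cs fuel (i + 1) PySem.Dict.empty
        let i2 := r.2 + 1                       -- skip the closing ')'
        let j := scanDig cs i2
        let mult := numVal cs i2 j
        parseB cs fuel j (mergeMul counts r.1 mult)
      else
        let j := scanLow cs (i + 1)
        let elem := String.ofList ((cs.drop i).take (j - i))
        let k := scanDig cs j
        let cnt := numVal cs j k
        parseB cs fuel k (addElem counts elem cnt)
    else (counts, i)

def count_of_atoms_v2_alt (formula : String) : String :=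
  let cs := formula.toList
  let r := parseB cs (cs.length + 1) 0 PySem.Dict.empty
  let sortedE := PySem.List.sorted2 r.1.items (fun p => p.1) (fun p => p.2) false
  PySem.Str.join "" (sortedE.map (fun p => p.1 ++ (if p.2 > 1 then PySem.Int.toStr p.2 else "")))

-- ===== PRECONDITION & SPEC =====
-- paren balance of a chunk: #'(' − #')'
def parBal (t : List Char) : Int := (t.count '(' : Int) - (t.count ')' : Int)

-- Pre_ excludes formulas with unbalanced parentheses: there A either raises IndexError
-- (a stray closing parenthesis) or silently drops the atoms inside unclosed open groups,
-- an accident of its stack implementation.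
def Pre_count_of_atoms_v2 (formula : String) : Prop :=
  (∀ p, p ≤ formula.toList.length → 0 ≤ parBal (formula.toList.take p)) ∧
  parBal formula.toList = 0
instance (formula : String) : Decidable (Pre_count_of_atoms_v2 formula) := by
  unfold Pre_count_of_atoms_v2; infer_instance

def pvWitness_count_of_atoms_v2 : String := "K4(ON(SO3)2)2"

def Spec_count_of_atoms_v2 (formula : String) (out : String) : Prop := out = count_of_atoms_v2_alt formula
instance (formula : String) (out : String) : Decidable (Spec_count_of_atoms_v2 formula out) := by unfold Spec_count_of_atoms_v2; infer_instance

-- ===== CLAIM (what is proved, stated in full; the proofs are below) =====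
def Claim_equal_count_of_atoms_v2 : Prop := ∀ (formula : String), Dom_count_of_atoms_v2 formula → Pre_count_of_atoms_v2 formula → Spec_count_of_atoms_v2 formula (count_of_atoms_v2 formula)

-- ===== LEMMAS AND PROOFS =====

-- canonical-fuel wrappers (proof-only)
def LA (cs : List Char) (i : Nat) (st : List (PySem.Dict String Int)) : List (PySem.Dict String Int) :=
  loopA cs (cs.length + 1 - i) i st
def PB (cs : List Char) (i : Nat) (d : PySem.Dict String Int) : PySem.Dict String Int × Nat :=
  parseB cs (cs.length + 1 - i) i d

-- scanners: basic bounds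
theorem scanDig_ge (cs : List Char) (i : Nat) : i ≤ scanDig cs i := by
  fun_induction scanDig with
  | case1 i h ih => omega
  | case2 i h => omega

theorem scanLow_ge (cs : List Char) (i : Nat) : i ≤ scanLow cs i := by
  fun_induction scanLow with
  | case1 i h ih => omega
  | case2 i h => omega

-- balance arithmetic
theorem parBal_cons (c : Char) (t : List Char) :
    parBal (c :: t) = (if c = '(' then 1 else if c = ')' then -1 else 0) + parBal t := by
  simp [parBal, List.count_cons]
  split_ifs with h1 h2 <;> simp_all <;> ring

theorem drop_getD {cs : List Char} {i : Nat} (h : i < cs.length) :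
    cs.drop i = cs.getD i ' ' :: cs.drop (i + 1) := by
  rw [List.getD_eq_getElem _ _ h]
  exact List.drop_eq_getElem_cons h

theorem isdigit_not_paren {c : Char} (h : PySem.Chars.isdigit c = true) :
    c ≠ '(' ∧ c ≠ ')' := by
  simp [PySem.Chars.isdigit] at h
  constructor <;> rintro rfl <;> simp at h

theorem islower_not_paren {c : Char} (h : PySem.Chars.islower c = true) :
    c ≠ '(' ∧ c ≠ ')' := by
  simp [PySem.Chars.islower] at h
  constructor <;> rintro rfl <;> simp at h

theorem parBal_drop_nonparen {cs : List Char} {i : Nat} (h : i < cs.length)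
    (hc : cs.getD i ' ' ≠ '(' ∧ cs.getD i ' ' ≠ ')') :
    parBal (cs.drop i) = parBal (cs.drop (i + 1)) := by
  rw [drop_getD h, parBal_cons]
  rcases hc with ⟨h1, h2⟩
  simp only [List.getD] at h1 h2 ⊢
  simp [h1, h2]

theorem parBal_drop_open {cs : List Char} {i : Nat} (h : i < cs.length)
    (hc : cs.getD i ' ' = '(') :
    parBal (cs.drop i) = 1 + parBal (cs.drop (i + 1)) := by
  rw [drop_getD h, parBal_cons, hc]; simp

theorem parBal_drop_close {cs : List Char} {i : Nat} (h : i < cs.length)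
    (hc : cs.getD i ' ' = ')') :
    parBal (cs.drop i) = -1 + parBal (cs.drop (i + 1)) := by
  rw [drop_getD h, parBal_cons, hc]; simp

theorem scanDig_bal (cs : List Char) (i : Nat) :
    parBal (cs.drop (scanDig cs i)) = parBal (cs.drop i) := by
  fun_induction scanDig with
  | case1 i h ih => rw [ih, parBal_drop_nonparen h.1 (isdigit_not_paren h.2)]
  | case2 i h => rfl

theorem scanLow_bal (cs : List Char) (i : Nat) :
    parBal (cs.drop (scanLow cs i)) = parBal (cs.drop i) := by
  fun_induction scanLow with
  | case1 i h ih => rw [ih, parBal_drop_nonparen h.1 (islower_not_paren h.2)]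
  | case2 i h => rfl

-- fuel irrelevance for loopA
theorem loopA_succ (cs : List Char) (f : Nat) :
    ∀ i st, cs.length ≤ i + f → loopA cs f i st = loopA cs (f + 1) i st := by
  induction f with
  | zero =>
    intro i st h
    rw [loopA.eq_1, loopA.eq_2, if_neg (by omega)]
  | succ f ih =>
    intro i st h
    rw [loopA.eq_2, loopA.eq_2]
    by_cases hi : i < cs.length
    · rw [if_pos hi, if_pos hi]
      split_ifs with h1 h2
      · refine ih _ _ ?_; omega
      · rcases st with _ | ⟨top, _ | ⟨outer, rest⟩⟩
        · rfl
        · rfl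
        · refine ih _ _ ?_; have := scanDig_ge cs (i+1); omega
      · rcases st with _ | ⟨top, rest⟩
        · rfl
        · refine ih _ _ ?_
          have := scanLow_ge cs (i+1); have := scanDig_ge cs (scanLow cs (i+1)); omega
    · rw [if_neg hi, if_neg hi]

theorem loopA_fuel (cs : List Char) (f g i : Nat) (st : List (PySem.Dict String Int))
    (hf : cs.length ≤ i + f) (hg : cs.length ≤ i + g) :
    loopA cs f i st = loopA cs g i st := by
  have key : ∀ k f i st, cs.length ≤ i + f → loopA cs f i st = loopA cs (f + k) i st := by
    intro k
    induction k with
    | zero => intro f i st h; rfl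
    | succ k ih =>
      intro f i st h
      rw [ih f i st h, loopA_succ cs (f + k) i st (by omega)]
      rfl
  rcases le_total f g with h | h
  · have := key (g - f) f i st hf; rwa [Nat.add_sub_cancel' h] at this
  · have := key (f - g) g i st hg; rw [Nat.add_sub_cancel' h] at this; exact this.symm

-- parseB results never move left
theorem parseB_ge (cs : List Char) (f : Nat) :
    ∀ i d, i ≤ (parseB cs f i d).2 := by
  induction f with
  | zero => intro i d; rw [parseB.eq_1]
  | succ f ih =>
    intro i d
    rw [parseB.eq_2]
    dsimp only
    split_ifs with h1 h2
    · have h3 := ih (scanDig cs ((parseB cs f (i + 1) PySem.Dict.empty).2 + 1))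
        (mergeMul d (parseB cs f (i + 1) PySem.Dict.empty).1
          (numVal cs ((parseB cs f (i + 1) PySem.Dict.empty).2 + 1)
            (scanDig cs ((parseB cs f (i + 1) PySem.Dict.empty).2 + 1))))
      have h4 := ih (i + 1) PySem.Dict.empty
      have h5 := scanDig_ge cs ((parseB cs f (i + 1) PySem.Dict.empty).2 + 1)
      omega
    · have h3 := ih (scanDig cs (scanLow cs (i + 1)))
        (addElem d (String.ofList ((cs.drop i).take (scanLow cs (i + 1) - i)))
          (numVal cs (scanLow cs (i + 1)) (scanDig cs (scanLow cs (i + 1)))))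
      have h4 := scanLow_ge cs (i + 1)
      have h5 := scanDig_ge cs (scanLow cs (i + 1))
      omega
    · exact le_refl i

theorem parseB_succ (cs : List Char) (f : Nat) :
    ∀ i d, cs.length ≤ i + f → parseB cs f i d = parseB cs (f + 1) i d := by
  induction f with
  | zero =>
    intro i d h
    rw [parseB.eq_1, parseB.eq_2, if_neg (by omega)]
  | succ f ih =>
    intro i d h
    rw [parseB.eq_2, parseB.eq_2]
    by_cases h1 : i < cs.length ∧ cs.getD i ' ' ≠ ')'
    · rw [if_pos h1, if_pos h1]
      split_ifs with h2
      · rw [← ih (i + 1) PySem.Dict.empty (by omega)]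
        have hg := parseB_ge cs f (i + 1) PySem.Dict.empty
        have hs := scanDig_ge cs ((parseB cs f (i + 1) PySem.Dict.empty).2 + 1)
        refine ih _ _ ?_; omega
      · have hl := scanLow_ge cs (i + 1)
        have hs := scanDig_ge cs (scanLow cs (i + 1))
        refine ih _ _ ?_; omega
    · rw [if_neg h1, if_neg h1]

theorem parseB_fuel (cs : List Char) (f g i : Nat) (d : PySem.Dict String Int)
    (hf : cs.length ≤ i + f) (hg : cs.length ≤ i + g) :
    parseB cs f i d = parseB cs g i d := by
  have key : ∀ k f i d, cs.length ≤ i + f → parseB cs f i d = parseB cs (f + k) i d := by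
    intro k
    induction k with
    | zero => intro f i d h; rfl
    | succ k ih =>
      intro f i d h
      rw [ih f i d h, parseB_succ cs (f + k) i d (by omega)]
      rfl
  rcases le_total f g with h | h
  · have := key (g - f) f i d hf; rwa [Nat.add_sub_cancel' h] at this
  · have := key (f - g) g i d hg; rw [Nat.add_sub_cancel' h] at this; exact this.symm

-- canonical-fuel step equations
theorem LA_stop (cs : List Char) (i : Nat) (st : List (PySem.Dict String Int))
    (h : ¬ i < cs.length) : LA cs i st = st := by
  unfold LA
  rcases Nat.eq_zero_or_eq_succ_pred (cs.length + 1 - i) with h2 | h2 <;> rw [h2]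
  · rw [loopA.eq_1]
  · rw [loopA.eq_2, if_neg h]

theorem LA_unfold (cs : List Char) (i : Nat) (st : List (PySem.Dict String Int))
    (h : i < cs.length) : LA cs i st = loopA cs (cs.length - i + 1) i st := by
  unfold LA; congr 1; omega

theorem la_fuel_to_LA (cs : List Char) (i j : Nat) (st : List (PySem.Dict String Int))
    (h : i < cs.length) (hj : i + 1 ≤ j) :
    loopA cs (cs.length - i) j st = LA cs j st := by
  unfold LA
  exact loopA_fuel cs _ _ j st (by omega) (by omega)

theorem LA_open (cs : List Char) (i : Nat) (st : List (PySem.Dict String Int))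
    (h : i < cs.length) (hc : cs.getD i ' ' = '(') :
    LA cs i st = LA cs (i + 1) (PySem.Dict.empty :: st) := by
  rw [LA_unfold cs i st h, loopA.eq_2, if_pos h, if_pos hc]
  exact la_fuel_to_LA cs i (i + 1) _ h (by omega)

theorem LA_close (cs : List Char) (i : Nat) (top outer : PySem.Dict String Int)
    (rest : List (PySem.Dict String Int))
    (h : i < cs.length) (hc : cs.getD i ' ' = ')') :
    LA cs i (top :: outer :: rest) =
      LA cs (scanDig cs (i + 1))
        (mergeMul outer top (numVal cs (i + 1) (scanDig cs (i + 1))) :: rest) := by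
  have hne : cs.getD i ' ' ≠ '(' := by rw [hc]; decide
  rw [LA_unfold _ _ _ h, loopA.eq_2, if_pos h, if_neg hne, if_pos hc]
  exact la_fuel_to_LA cs i _ _ h (by have := scanDig_ge cs (i + 1); omega)

theorem LA_close_small (cs : List Char) (i : Nat) (st : List (PySem.Dict String Int))
    (h : i < cs.length) (hc : cs.getD i ' ' = ')')
    (hst : st = [] ∨ ∃ top, st = [top]) :
    LA cs i st = [] := by
  have hne : cs.getD i ' ' ≠ '(' := by rw [hc]; decide
  rw [LA_unfold _ _ _ h, loopA.eq_2, if_pos h, if_neg hne, if_pos hc]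
  rcases hst with rfl | ⟨top, rfl⟩ <;> rfl

theorem LA_elem (cs : List Char) (i : Nat) (top : PySem.Dict String Int)
    (rest : List (PySem.Dict String Int))
    (h : i < cs.length) (hc1 : cs.getD i ' ' ≠ '(') (hc2 : cs.getD i ' ' ≠ ')') :
    LA cs i (top :: rest) =
      LA cs (scanDig cs (scanLow cs (i + 1)))
        (addElem top (String.ofList ((cs.drop i).take (scanLow cs (i + 1) - i)))
          (numVal cs (scanLow cs (i + 1)) (scanDig cs (scanLow cs (i + 1)))) :: rest) := by
  rw [LA_unfold _ _ _ h, loopA.eq_2, if_pos h, if_neg hc1, if_neg hc2]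
  exact la_fuel_to_LA cs i _ _ h
    (by have := scanLow_ge cs (i + 1); have := scanDig_ge cs (scanLow cs (i + 1)); omega)

theorem PB_stop (cs : List Char) (i : Nat) (d : PySem.Dict String Int)
    (h : ¬ (i < cs.length ∧ cs.getD i ' ' ≠ ')')) : PB cs i d = (d, i) := by
  unfold PB
  rcases Nat.eq_zero_or_eq_succ_pred (cs.length + 1 - i) with h2 | h2 <;> rw [h2]
  · rw [parseB.eq_1]
  · rw [parseB.eq_2, if_neg h]

theorem PB_unfold (cs : List Char) (i : Nat) (d : PySem.Dict String Int)
    (h : i < cs.length) : PB cs i d = parseB cs (cs.length - i + 1) i d := by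
  unfold PB; congr 1; omega

theorem pb_fuel_to_PB (cs : List Char) (i j : Nat) (d : PySem.Dict String Int)
    (h : i < cs.length) (hj : i + 1 ≤ j) :
    parseB cs (cs.length - i) j d = PB cs j d := by
  unfold PB
  exact parseB_fuel cs _ _ j d (by omega) (by omega)

theorem PB_open (cs : List Char) (i : Nat) (d : PySem.Dict String Int)
    (h : i < cs.length) (hc : cs.getD i ' ' = '(') :
    PB cs i d =
      PB cs (scanDig cs ((PB cs (i + 1) PySem.Dict.empty).2 + 1))
        (mergeMul d (PB cs (i + 1) PySem.Dict.empty).1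
          (numVal cs ((PB cs (i + 1) PySem.Dict.empty).2 + 1)
            (scanDig cs ((PB cs (i + 1) PySem.Dict.empty).2 + 1)))) := by
  have hg : i < cs.length ∧ cs.getD i ' ' ≠ ')' := ⟨h, by rw [hc]; decide⟩
  rw [PB_unfold _ _ _ h, parseB.eq_2, if_pos hg, if_pos hc]
  rw [pb_fuel_to_PB cs i (i + 1) PySem.Dict.empty h (by omega)]
  have hge := parseB_ge cs (cs.length + 1 - (i + 1)) (i + 1) PySem.Dict.empty
  have hs := scanDig_ge cs ((PB cs (i + 1) PySem.Dict.empty).2 + 1)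
  have hge' : i + 1 ≤ (PB cs (i + 1) PySem.Dict.empty).2 := by unfold PB; exact hge
  exact pb_fuel_to_PB cs i _ _ h (by omega)

theorem PB_elem (cs : List Char) (i : Nat) (d : PySem.Dict String Int)
    (h : i < cs.length) (hc1 : cs.getD i ' ' ≠ '(') (hc2 : cs.getD i ' ' ≠ ')') :
    PB cs i d =
      PB cs (scanDig cs (scanLow cs (i + 1)))
        (addElem d (String.ofList ((cs.drop i).take (scanLow cs (i + 1) - i)))
          (numVal cs (scanLow cs (i + 1)) (scanDig cs (scanLow cs (i + 1))))) := by
  have hg : i < cs.length ∧ cs.getD i ' ' ≠ ')' := ⟨h, hc2⟩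
  rw [PB_unfold _ _ _ h, parseB.eq_2, if_pos hg, if_neg hc1]
  exact pb_fuel_to_PB cs i _ _ h
    (by have := scanLow_ge cs (i + 1); have := scanDig_ge cs (scanLow cs (i + 1)); omega)

theorem PB_ge (cs : List Char) (i : Nat) (d : PySem.Dict String Int) :
    i ≤ (PB cs i d).2 := by
  unfold PB; exact parseB_ge cs _ i d

-- where parseB stops, and the balance of what it consumed
theorem PB_spec (cs : List Char) : ∀ m i d, cs.length - i ≤ m →
    (((PB cs i d).2 < cs.length →
        cs.getD (PB cs i d).2 ' ' = ')' ∧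
        parBal (cs.drop i) = parBal (cs.drop (PB cs i d).2)) ∧
      (cs.length ≤ (PB cs i d).2 → 0 ≤ parBal (cs.drop i))) := by
  intro m
  induction m with
  | zero =>
    intro i d h
    have hi : ¬ (i < cs.length ∧ cs.getD i ' ' ≠ ')') ∨ i < cs.length := by omega
    by_cases hlt : i < cs.length ∧ cs.getD i ' ' ≠ ')'
    · omega
    · rw [PB_stop cs i d hlt]
      constructor
      · intro hl
        refine ⟨?_, rfl⟩
        by_contra hx
        exact hlt ⟨by omega, hx⟩
      · intro hl
        have : cs.drop i = [] := List.drop_eq_nil_of_le (by omega)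
        rw [this]; simp [parBal]
  | succ m ih =>
    intro i d h
    by_cases hg : i < cs.length ∧ cs.getD i ' ' ≠ ')'
    · by_cases hc : cs.getD i ' ' = '('
      · -- '(' : inner parse, then continue
        rw [PB_open cs i d hg.1 hc]
        set r1 := PB cs (i + 1) PySem.Dict.empty with hr1
        have hr1ge : i + 1 ≤ r1.2 := PB_ge cs (i + 1) _
        have ihin := ih (i + 1) PySem.Dict.empty (by omega)
        rw [← hr1] at ihin
        set j := scanDig cs (r1.2 + 1) with hj
        have hjge : r1.2 + 1 ≤ j := scanDig_ge cs (r1.2 + 1)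
        have ihout := ih j (mergeMul d r1.1 (numVal cs (r1.2 + 1) j)) (by omega)
        set r := PB cs j (mergeMul d r1.1 (numVal cs (r1.2 + 1) j)) with hr
        have hrge : j ≤ r.2 := PB_ge cs j _
        have hbi : parBal (cs.drop i) = 1 + parBal (cs.drop (i + 1)) :=
          parBal_drop_open hg.1 hc
        by_cases h1 : r1.2 < cs.length
        · obtain ⟨hch, hbal⟩ := ihin.1 h1
          have hbr : parBal (cs.drop r1.2) = -1 + parBal (cs.drop (r1.2 + 1)) :=
            parBal_drop_close h1 hch
          have hbj : parBal (cs.drop j) = parBal (cs.drop (r1.2 + 1)) := scanDig_bal cs (r1.2 + 1)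
          constructor
          · intro hl
            obtain ⟨hch2, hbal2⟩ := ihout.1 hl
            exact ⟨hch2, by omega⟩
          · intro hl
            have := ihout.2 hl
            omega
        · -- inner ran to the end of the string: everything after is consumed too
          have hb1 : 0 ≤ parBal (cs.drop (i + 1)) := ihin.2 (by omega)
          constructor
          · intro hl
            obtain ⟨hch2, hbal2⟩ := ihout.1 hl
            -- impossible anyway (j > length), but we do not need that
            refine ⟨hch2, ?_⟩
            omega
          · intro hl
            have hjn : ¬ j < cs.length → parBal (cs.drop j) = 0 := by
              intro hx
              rw [List.drop_eq_nil_of_le (by omega)]; simp [parBal]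
            have hbj : parBal (cs.drop j) = 0 := hjn (by omega)
            have hbj2 : parBal (cs.drop (r1.2 + 1)) = 0 := by
              rw [List.drop_eq_nil_of_le (by omega)]; simp [parBal]
            omega
      · -- element
        rw [PB_elem cs i d hg.1 hc hg.2]
        set i1 := scanLow cs (i + 1) with hi1
        set i2 := scanDig cs i1 with hi2
        have h1 : i + 1 ≤ i1 := scanLow_ge cs (i + 1)
        have h2 : i1 ≤ i2 := scanDig_ge cs i1
        have ihe := ih i2 (addElem d (String.ofList ((cs.drop i).take (i1 - i)))
          (numVal cs i1 i2)) (by omega)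
        have hb : parBal (cs.drop i) = parBal (cs.drop i2) := by
          have e1 : parBal (cs.drop i) = parBal (cs.drop (i + 1)) :=
            parBal_drop_nonparen hg.1 ⟨hc, hg.2⟩
          have e2 : parBal (cs.drop i1) = parBal (cs.drop (i + 1)) := scanLow_bal cs (i + 1)
          have e3 : parBal (cs.drop i2) = parBal (cs.drop i1) := scanDig_bal cs i1
          omega
        constructor
        · intro hl
          obtain ⟨hch2, hbal2⟩ := ihe.1 hl
          exact ⟨hch2, by omega⟩
        · intro hl
          have := ihe.2 hl
          omega
    · rw [PB_stop cs i d hg]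
      constructor
      · intro hl
        refine ⟨?_, rfl⟩
        by_contra hx
        exact hg ⟨hl, hx⟩
      · intro hl
        rw [List.drop_eq_nil_of_le (by omega)]; simp [parBal]

-- the simulation: A's stack machine tracks B's recursive descent
theorem SIM (cs : List Char) : ∀ m i d s, cs.length - i ≤ m →
    (∀ p, i ≤ p → parBal (cs.drop p) ≤ 0) →
    LA cs i (d :: s) =
      (if (PB cs i d).2 < cs.length then
        (match s with
          | outer :: rest =>
            LA cs (scanDig cs ((PB cs i d).2 + 1))
              (mergeMul outer (PB cs i d).1
                (numVal cs ((PB cs i d).2 + 1) (scanDig cs ((PB cs i d).2 + 1))) :: rest)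
          | [] => [])
      else (PB cs i d).1 :: s) := by
  intro m
  induction m with
  | zero =>
    intro i d s h hC
    have hi : ¬ i < cs.length := by omega
    rw [LA_stop cs i _ hi, PB_stop cs i d (by tauto)]
    rw [if_neg (by simpa using hi)]
  | succ m ih =>
    intro i d s h hC
    by_cases hil : i < cs.length
    · by_cases hc : cs.getD i ' ' = '('
      · -- '('
        have hCi := hC i (le_refl i)
        have hbi : parBal (cs.drop i) = 1 + parBal (cs.drop (i + 1)) :=
          parBal_drop_open hil hc
        have hneg : parBal (cs.drop (i + 1)) ≤ -1 := by omega
        set r1 := PB cs (i + 1) PySem.Dict.empty with hr1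
        have hr1lt : r1.2 < cs.length := by
          by_contra hx
          have hsp := (PB_spec cs (cs.length - (i + 1)) (i + 1) PySem.Dict.empty (le_refl _)).2
          rw [← hr1] at hsp
          have := hsp (by omega)
          omega
        have hr1ge : i + 1 ≤ r1.2 := PB_ge cs (i + 1) _
        set j := scanDig cs (r1.2 + 1) with hj
        have hjge : r1.2 + 1 ≤ j := scanDig_ge cs (r1.2 + 1)
        rw [LA_open cs i (d :: s) hil hc]
        rw [ih (i + 1) PySem.Dict.empty (d :: s) (by omega) (fun p hp => hC p (by omega))]
        rw [← hr1, if_pos hr1lt]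
        rw [PB_open cs i d hil hc, ← hr1, ← hj]
        exact ih j _ s (by omega) (fun p hp => hC p (by omega))
      · by_cases hc2 : cs.getD i ' ' = ')'
        · -- ')'
          rw [PB_stop cs i d (by intro hx; exact hx.2 hc2)]
          simp only
          rw [if_pos hil]
          match s with
          | outer :: rest => exact LA_close cs i d outer rest hil hc2
          | [] => exact LA_close_small cs i [d] hil hc2 (Or.inr ⟨d, rfl⟩)
        · -- element
          rw [LA_elem cs i d s hil hc hc2]
          rw [ih (scanDig cs (scanLow cs (i + 1))) _ s
            (by have := scanLow_ge cs (i + 1); have := scanDig_ge cs (scanLow cs (i + 1)); omega)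
            (fun p hp => hC p (by have := scanLow_ge cs (i + 1); have := scanDig_ge cs (scanLow cs (i + 1)); omega))]
          rw [PB_elem cs i d hil hc hc2]
    · rw [LA_stop cs i _ hil, PB_stop cs i d (by tauto)]
      rw [if_neg (by simpa using hil)]

-- the two output stages agree on the same dict
theorem render_eq (L : List (String × Int)) :
    PySem.Str.join ""
      (L.foldl (fun (r : List String) p =>
        let r1 := r ++ [p.1]
        if p.2 > 1 then r1 ++ [PySem.Int.toStr p.2] else r1) []) =
    PySem.Str.join ""
      (L.map (fun p => p.1 ++ (if p.2 > 1 then PySem.Int.toStr p.2 else ""))) := by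
  have hf : (fun (r : List String) p =>
        let r1 := r ++ [p.1]
        if p.2 > 1 then r1 ++ [PySem.Int.toStr p.2] else r1) =
      (fun (acc : List String) (x : String × Int) =>
        acc ++ if x.2 > 1 then [x.1, PySem.Int.toStr x.2] else [x.1]) := by
    funext r p
    dsimp only
    split_ifs <;> simp
  rw [hf, PySem.List.foldl_append_eq_flatMap
      (fun p : String × Int => if p.2 > 1 then [p.1, PySem.Int.toStr p.2] else [p.1]) L []]
  apply String.toList_inj.mp
  simp only [PySem.Str.join, String.toList_ofList, PySem.Chars.join]
  have hnil : "".toList = ([] : List Char) := rfl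
  rw [hnil, List.nil_append]
  have hic : ∀ l : List (List Char), ([] : List Char).intercalate l = l.flatten := by
    intro l
    simp [List.intercalate]
    induction l with
    | nil => rfl
    | cons a t ih => cases t <;> simp_all [List.intersperse]
  rw [hic, hic]
  induction L with
  | nil => rfl
  | cons p t iht =>
    simp only [List.flatMap_cons, List.map_cons, List.map_append, List.flatten_append,
      List.flatten_cons]
    rw [iht]
    split_ifs with h <;> simp [String.toList_append]

theorem parBal_append (a b : List Char) : parBal (a ++ b) = parBal a + parBal b := by
  simp [parBal, List.count_append]
  ring

theorem pre_C (cs : List Char)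
    (h1 : ∀ p, p ≤ cs.length → 0 ≤ parBal (cs.take p)) (h2 : parBal cs = 0) :
    ∀ p, parBal (cs.drop p) ≤ 0 := by
  intro p
  by_cases hp : p ≤ cs.length
  · have h3 := h1 p hp
    have hsplit := parBal_append (cs.take p) (cs.drop p)
    rw [List.take_append_drop] at hsplit
    omega
  · rw [List.drop_eq_nil_of_le (by omega)]; simp [parBal]

-- ===== VERDICT (by name: the statement is the Claim_ definition above) =====
theorem count_of_atoms_v2_spec : Claim_equal_count_of_atoms_v2 := by
  unfold Claim_equal_count_of_atoms_v2
  intro formula _ hpre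
  unfold Spec_count_of_atoms_v2 count_of_atoms_v2 count_of_atoms_v2_alt
  dsimp only
  obtain ⟨hp1, hp2⟩ := hpre
  set cs := formula.toList with hcs
  have hC : ∀ p, parBal (cs.drop p) ≤ 0 := pre_C cs hp1 hp2
  have hsim := SIM cs cs.length 0 PySem.Dict.empty [] (by omega) (fun p _ => hC p)
  have hLA : loopA cs (cs.length + 1) 0 [PySem.Dict.empty] = LA cs 0 [PySem.Dict.empty] := by
    unfold LA; norm_num
  have hPB : parseB cs (cs.length + 1) 0 PySem.Dict.empty = PB cs 0 PySem.Dict.empty := by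
    unfold PB; norm_num
  have hstop : ¬ (PB cs 0 PySem.Dict.empty).2 < cs.length := by
    intro hx
    obtain ⟨hch, hbal⟩ := (PB_spec cs cs.length 0 PySem.Dict.empty (by omega)).1 hx
    rw [List.drop_zero] at hbal
    have hcl : parBal (cs.drop (PB cs 0 PySem.Dict.empty).2) =
        -1 + parBal (cs.drop ((PB cs 0 PySem.Dict.empty).2 + 1)) := parBal_drop_close hx hch
    have h3 := hC ((PB cs 0 PySem.Dict.empty).2 + 1)
    omega
  rw [if_neg hstop] at hsim
  rw [hLA, hsim, hPB]
  exact render_eq _
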